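-- pv_equiv track=rewrite | github.com/joie-zhang/bargain | ui/game1_sample_viewer.py | collect_entries_by_round
-- ===== SOURCE A (Python) =====
-- from collections import defaultdict
-- from typing import Any, Dict, List, Optional, Tuple
--
-- def collect_entries_by_round(
--     interactions: List[Dict[str, Any]]
-- ) -> Dict[int, List[Dict[str, Any]]]:
--     grouped: Dict[int, List[Dict[str, Any]]] = defaultdict(list)
--     for entry in interactions:
--         round_num = int(entry.get("round") or 0)
--         grouped[round_num].append(entry)
--     return dict(sorted(grouped.items()))
-- ===== SOURCE B (Python) =====
-- def collect_entries_by_round(interactions):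
--     # Sort-then-scan: stable-sort the entries by round key, then cut the
--     # sorted list into consecutive runs of equal keys (no intermediate dict).
--     def round_key(entry):
--         return int(entry.get("round") or 0)
--
--     ordered = sorted(interactions, key=round_key)
--     result = {}
--     n = len(ordered)
--     i = 0
--     while i < n:
--         k = round_key(ordered[i])
--         j = i + 1
--         while j < n and round_key(ordered[j]) == k:
--             j += 1
--         result[k] = ordered[i:j]
--         i = j
--     return result
-- ===== Notes on version B (the rewrite author's own statement) =====
-- stated objective: alternative
-- what changed: A groups entries into a defaultdict in one pass and then sorts the dict items by key; B stable-sorts the whole entry list by the round key and then slices it into consecutive equal-key runs in a single scan, never building an intermediate grouping dict.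
import Mathlib
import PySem

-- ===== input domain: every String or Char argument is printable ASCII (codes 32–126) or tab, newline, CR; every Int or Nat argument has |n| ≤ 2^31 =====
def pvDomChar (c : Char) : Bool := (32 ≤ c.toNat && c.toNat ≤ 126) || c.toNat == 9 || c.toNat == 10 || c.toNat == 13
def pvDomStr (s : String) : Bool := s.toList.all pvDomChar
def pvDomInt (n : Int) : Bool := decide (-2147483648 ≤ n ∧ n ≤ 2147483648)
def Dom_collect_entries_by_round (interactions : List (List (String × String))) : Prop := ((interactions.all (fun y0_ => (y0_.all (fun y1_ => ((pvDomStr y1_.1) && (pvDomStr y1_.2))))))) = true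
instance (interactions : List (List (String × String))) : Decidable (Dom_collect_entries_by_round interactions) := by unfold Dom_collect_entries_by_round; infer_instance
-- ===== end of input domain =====

-- B replaces A's defaultdict-group-then-sort-items by stable-sort-then-scan into
-- consecutive equal-key runs (an alternative algorithm of similar cost).


-- ===== PORT A =====
-- int(entry.get("round") or 0): missing key or empty ("" is falsy) gives 0; the
-- .getD 0 branch is only reached where Python's int(s) raises (excluded by Pre_).
def pvRoundKey (entry : List (String × String)) : Int :=
  match (PySem.Dict.mk entry).get? "round" with
  | none => 0
  | some s => if s = "" then 0 else (PySem.Int.ofStr? s).getD 0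

-- sorted(grouped.items()) compares pairs; dict keys are distinct, so the order
-- is exactly sort-by-first-component (second components are never compared).
def collect_entries_by_round (interactions : List (List (String × String))) : List (Int × List (List (String × String))) :=
  let grouped := interactions.foldl
    (fun d entry => d.modify (pvRoundKey entry) [] (fun l => l ++ [entry]))
    PySem.Dict.empty
  PySem.List.sorted grouped.items (fun p => p.1) false

-- ===== PORT B =====
-- Source B's index scan 'while j < n and round_key(ordered[j]) == k' cutting one
-- run [i:j] per outer step, as structural recursion: one run per call.
def pvGroupRuns (ys : List (List (String × String))) : List (Int × List (List (String × String))) :=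
  match ys with
  | [] => []
  | e :: rest =>
    let k := pvRoundKey e
    (k, e :: rest.takeWhile (fun x => pvRoundKey x == k)) ::
      pvGroupRuns (rest.dropWhile (fun x => pvRoundKey x == k))
termination_by ys.length
decreasing_by
  simp only [List.length_cons]
  have := List.length_dropWhile_le (p := fun x => pvRoundKey x == pvRoundKey e) (l := rest)
  omega

def collect_entries_by_round_alt (interactions : List (List (String × String))) : List (Int × List (List (String × String))) :=
  pvGroupRuns (PySem.List.sorted interactions pvRoundKey false)

-- ===== PRECONDITION & SPEC =====
-- Pre_ excludes exactly the inputs where Python's int() raises ValueError: an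
-- entry whose "round" value is a non-empty string that is not int-parsable.
def Pre_collect_entries_by_round (interactions : List (List (String × String))) : Prop :=
  (interactions.all (fun e =>
    match (PySem.Dict.mk e).get? "round" with
    | none => true
    | some s => s == "" || (PySem.Int.ofStr? s).isSome)) = true
instance (interactions : List (List (String × String))) : Decidable (Pre_collect_entries_by_round interactions) := by unfold Pre_collect_entries_by_round; infer_instance

def pvWitness_collect_entries_by_round : (List (List (String × String))) :=
  [[("round", "2"), ("text", "hi")], [("speaker", "alice")], [("round", "1")]]

def Spec_collect_entries_by_round (interactions : List (List (String × String))) (out : List (Int × List (List (String × String)))) : Prop := out = collect_entries_by_round_alt interactions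
instance (interactions : List (List (String × String))) (out : List (Int × List (List (String × String)))) : Decidable (Spec_collect_entries_by_round interactions out) := by unfold Spec_collect_entries_by_round; infer_instance

-- ===== CLAIM (what is proved, stated in full; the proofs are below) =====
def Claim_equal_collect_entries_by_round : Prop := ∀ (interactions : List (List (String × String))), Dom_collect_entries_by_round interactions → Pre_collect_entries_by_round interactions → Spec_collect_entries_by_round interactions (collect_entries_by_round interactions)

-- ===== LEMMAS AND PROOFS =====

-- the canonical group of key k, drawn from the ORIGINAL list xs
def pvGroup (xs : List (List (String × String))) (k : Int) : Int × List (List (String × String)) :=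
  (k, xs.filter (fun e => pvRoundKey e == k))

theorem pv_dedup_sublist {α : Type} [DecidableEq α] (l : List α) :
    (PySem.List.dedup l).Sublist l := by
  induction l with
  | nil => simp [PySem.List.dedup]
  | cons x xs ih =>
    have h1 : PySem.List.dedup (x :: xs) = x :: PySem.Set.discard (PySem.List.dedup xs) x := by
      simp only [PySem.List.dedup_eq_ofList, PySem.Set.ofList_cons]
    rw [h1]
    refine List.Sublist.cons₂ x ?_
    have h2 : (PySem.Set.discard (PySem.List.dedup xs) x).Sublist (PySem.List.dedup xs) := by
      show (List.filter _ _).Sublist _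
      exact List.filter_sublist
    exact h2.trans ih

theorem pv_dedup_const_prefix {α : Type} [DecidableEq α] (k : α) (l1 l2 : List α)
    (h1 : ∀ a ∈ l1, a = k) (h2 : k ∉ l2) :
    PySem.List.dedup (k :: (l1 ++ l2)) = k :: PySem.List.dedup l2 := by
  have hfilt : PySem.Set.discard (PySem.List.dedup l2) k = PySem.List.dedup l2 := by
    show List.filter _ _ = _
    apply List.filter_eq_self.mpr
    intro a ha
    have : a ∈ l2 := (PySem.List.mem_dedup _ _).mp ha
    exact bne_iff_ne.mpr (fun hh => h2 (hh ▸ this))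
  have dedup_cons : ∀ (x : α) (l : List α),
      PySem.List.dedup (x :: l) = x :: PySem.Set.discard (PySem.List.dedup l) x := by
    intro x l
    simp only [PySem.List.dedup_eq_ofList, PySem.Set.ofList_cons]
  induction l1 with
  | nil =>
    rw [List.nil_append, dedup_cons, hfilt]
  | cons a l1 ih =>
    have ha : a = k := h1 a List.mem_cons_self
    subst ha
    have ih' := ih (fun b hb => h1 b (List.mem_cons_of_mem a hb))
    calc PySem.List.dedup (a :: (a :: l1 ++ l2))
        = a :: PySem.Set.discard (PySem.List.dedup (a :: (l1 ++ l2))) a := by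
          rw [List.cons_append, dedup_cons]
      _ = a :: PySem.Set.discard (a :: PySem.List.dedup l2) a := by rw [ih']
      _ = a :: PySem.List.dedup l2 := by
          show a :: List.filter _ _ = _
          rw [List.filter_cons]
          simp
          exact fun b hb hba => h2 (hba ▸ hb)

theorem pv_dedup_append_of_mem {α : Type} [DecidableEq α] (l : List α) (x : α) (h : x ∈ l) :
    PySem.List.dedup (l ++ [x]) = PySem.List.dedup l := by
  have hadd : ∀ (s : PySem.Set α) (y : α), PySem.Set.add s y = if s.contains y then s else s ++ [y] :=
    fun _ _ => rfl
  rw [PySem.List.dedup_eq_ofList, PySem.List.dedup_eq_ofList, PySem.Set.ofList_append_singleton, hadd]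
  have hc : (PySem.Set.ofList l).contains x = true := by
    have hm : x ∈ PySem.Set.ofList l := by
      rw [PySem.Set.mem_ofList]; exact h
    simpa [List.contains_iff_mem] using hm
  rw [hc, if_pos rfl]

theorem pv_dedup_append_of_not_mem {α : Type} [DecidableEq α] (l : List α) (x : α) (h : x ∉ l) :
    PySem.List.dedup (l ++ [x]) = PySem.List.dedup l ++ [x] := by
  have hadd : ∀ (s : PySem.Set α) (y : α), PySem.Set.add s y = if s.contains y then s else s ++ [y] :=
    fun _ _ => rfl
  rw [PySem.List.dedup_eq_ofList, PySem.List.dedup_eq_ofList, PySem.Set.ofList_append_singleton, hadd]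
  have hc : (PySem.Set.ofList l).contains x = false := by
    have hm : x ∉ PySem.Set.ofList l := by
      rw [PySem.Set.mem_ofList]; exact h
    simpa [List.contains_iff_mem] using hm
  rw [hc]
  simp

theorem pv_filter_insertBy {α : Type} (key : α → Int) (S : List α) (x : α) (k : Int)
    (h : S.Pairwise (fun a b => key a ≤ key b)) :
    (PySem.List.insertBy (fun a b => decide (key a < key b)) x S).filter (fun e => key e == k)
    = if key x == k then S.filter (fun e => key e == k) ++ [x]
      else S.filter (fun e => key e == k) := by
  induction S with
  | nil =>
    simp [PySem.List.insertBy, List.filter]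
    split <;> simp_all
  | cons y t ih =>
    have hy : ∀ z ∈ t, key y ≤ key z := by
      intro z hz; exact (List.pairwise_cons.mp h).1 z hz
    have ht : t.Pairwise (fun a b => key a ≤ key b) := (List.pairwise_cons.mp h).2
    show (if decide (key x < key y) = true then x :: y :: t
          else y :: PySem.List.insertBy (fun a b => decide (key a < key b)) x t).filter _ = _
    by_cases hlt : key x < key y
    · by_cases hk : key x = k
      · have hall : ∀ z ∈ y :: t, ¬ (key z == k) = true := by
          intro z hz
          have : key y ≤ key z := by
            rcases List.mem_cons.mp hz with h1 | h1
            · simp [h1]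
            · exact hy z h1
          simp only [beq_iff_eq]; omega
        have hyne : ¬ key y = k := by
          have := hall y (List.mem_cons_self); simpa using this
        have htf : t.filter (fun e => key e == k) = [] :=
          List.filter_eq_nil_iff.mpr (fun z hz => hall z (List.mem_cons_of_mem y hz))
        subst hk
        simp [hlt, hyne, htf]
      · simp [hlt, List.filter_cons, hk]
    · simp only [hlt, decide_false, Bool.false_eq_true, if_false, List.filter_cons]
      rw [ih ht]
      by_cases hyk : key y = k <;> by_cases hxk : key x = k <;> simp [hyk, hxk]

theorem pv_sorted_append_singleton {α : Type} (key : α → Int) (xs : List α) (x : α) :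
    PySem.List.sorted (xs ++ [x]) key false
    = PySem.List.insertBy (fun a b => decide (key a < key b)) x (PySem.List.sorted xs key false) := by
  rw [PySem.List.sorted_eq_foldl_insertBy, PySem.List.sorted_eq_foldl_insertBy, List.foldl_append]
  rfl

theorem pv_filter_sorted {α : Type} (key : α → Int) (xs : List α) (k : Int) :
    (PySem.List.sorted xs key false).filter (fun e => key e == k)
    = xs.filter (fun e => key e == k) := by
  induction xs using List.reverseRecOn with
  | nil => rfl
  | append_singleton xs x ih =>
    rw [pv_sorted_append_singleton, pv_filter_insertBy key _ x k (PySem.List.sorted_pairwise xs key),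
        List.filter_append, ih, List.filter_cons]
    by_cases hk : key x = k <;> simp [hk]

theorem pv_runs_eq (ys : List (List (String × String)))
    (h : ys.Pairwise (fun a b => pvRoundKey a ≤ pvRoundKey b)) :
    pvGroupRuns ys = (PySem.List.dedup (ys.map pvRoundKey)).map (pvGroup ys) := by
  induction ys using pvGroupRuns.induct with
  | case1 => rw [pvGroupRuns]; rfl
  | case2 e rest hx ih =>
    have hsplit : rest.takeWhile (fun x => pvRoundKey x == pvRoundKey e) ++ rest.dropWhile (fun x => pvRoundKey x == pvRoundKey e) = rest :=
      List.takeWhile_append_dropWhile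
    set k := pvRoundKey e with hkdef
    set t := rest.takeWhile (fun x => pvRoundKey x == k) with htdef
    set d := rest.dropWhile (fun x => pvRoundKey x == k) with hddef
    have hrest : ∀ x ∈ rest, k ≤ pvRoundKey x := (List.pairwise_cons.mp h).1
    have hrp : rest.Pairwise (fun a b => pvRoundKey a ≤ pvRoundKey b) := (List.pairwise_cons.mp h).2
    have ht : ∀ x ∈ t, pvRoundKey x = k := by
      intro x hx
      have := List.mem_takeWhile_imp hx
      simpa using this
    have hdsub : d.Sublist rest := List.dropWhile_sublist _
    have hdp : d.Pairwise (fun a b => pvRoundKey a ≤ pvRoundKey b) := hrp.sublist hdsub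
    have hd : ∀ x ∈ d, k < pvRoundKey x := by
      cases hdd : d with
      | nil => intro x hx; cases hx
      | cons d0 d' =>
        have hp0 : (pvRoundKey d0 == k) = false := by
          have := List.head?_dropWhile_not (fun x => pvRoundKey x == k) rest
          rw [← hddef, hdd] at this
          simpa using this
        have h0mem : d0 ∈ rest := hdsub.mem (hdd ▸ List.mem_cons_self)
        have hk0 : k < pvRoundKey d0 := by
          have h1 := hrest d0 h0mem
          have h2 : pvRoundKey d0 ≠ k := by simpa using hp0
          omega
        intro x hx
        rcases List.mem_cons.mp hx with h1 | h1
        · rw [h1]; exact hk0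
        · have : pvRoundKey d0 ≤ pvRoundKey x := by
            have := hdd ▸ hdp
            exact (List.pairwise_cons.mp this).1 x h1
          omega
    have hdne : ∀ x ∈ d, pvRoundKey x ≠ k := fun x hx => ne_of_gt (hd x hx)
    have hkeys : PySem.List.dedup ((e :: rest).map pvRoundKey)
        = k :: PySem.List.dedup (d.map pvRoundKey) := by
      rw [List.map_cons, ← hsplit, List.map_append]
      exact pv_dedup_const_prefix k _ _
        (by intro a ha; rcases List.mem_map.mp ha with ⟨x, hx1, hx2⟩; rw [← hx2]; exact ht x hx1)
        (by intro hmem; rcases List.mem_map.mp hmem with ⟨x, hx1, hx2⟩; exact hdne x hx1 hx2)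
    have hfiltT : t.filter (fun x => pvRoundKey x == k) = t :=
      List.filter_eq_self.mpr (fun x hx => by simp [ht x hx])
    have hfiltD : d.filter (fun x => pvRoundKey x == k) = [] :=
      List.filter_eq_nil_iff.mpr (fun x hx => by simp [hdne x hx])
    have hfk : (e :: rest).filter (fun x => pvRoundKey x == k) = e :: t := by
      rw [List.filter_cons, ← hsplit, List.filter_append, hfiltT, hfiltD]
      simp
      exact hkdef.symm
    have hfk' : ∀ k' ∈ PySem.List.dedup (d.map pvRoundKey),
        (e :: rest).filter (fun x => pvRoundKey x == k') = d.filter (fun x => pvRoundKey x == k') := by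
      intro k' hk'
      have hk'mem : k' ∈ d.map pvRoundKey := (PySem.List.mem_dedup _ _).mp hk'
      rcases List.mem_map.mp hk'mem with ⟨x0, hx0, hx0k⟩
      have hkne : k ≠ k' := by have := hd x0 hx0; omega
      rw [List.filter_cons, ← hsplit, List.filter_append]
      have h1 : t.filter (fun x => pvRoundKey x == k') = [] :=
        List.filter_eq_nil_iff.mpr (fun x hx => by simp [ht x hx]; omega)
      rw [h1]
      simp
      omega
    rw [pvGroupRuns]
    rw [hkeys, List.map_cons]
    have hg1 : pvGroup (e :: rest) k = (k, e :: t) := by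
      unfold pvGroup; rw [hfk]
    have hg2 : (PySem.List.dedup (d.map pvRoundKey)).map (pvGroup (e :: rest))
        = (PySem.List.dedup (d.map pvRoundKey)).map (pvGroup d) := by
      apply List.map_congr_left
      intro k' hk'
      unfold pvGroup
      rw [hfk' k' hk']
    rw [hg1, hg2, ← ih hdp]

theorem pv_fold_items (xs : List (List (String × String))) :
    (xs.foldl (fun d e => d.modify (pvRoundKey e) [] (fun l => l ++ [e]))
      PySem.Dict.empty).items
    = (PySem.List.dedup (xs.map pvRoundKey)).map (pvGroup xs) := by
  induction xs using List.reverseRecOn with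
  | nil => rfl
  | append_singleton xs e ih =>
    rw [List.foldl_append]
    set D := xs.foldl (fun d e => d.modify (pvRoundKey e) [] (fun l => l ++ [e])) PySem.Dict.empty with hD
    set k' := pvRoundKey e with hk'
    have hmod : D.modify k' [] (fun l => l ++ [e]) = D.insert k' (D.getD k' [] ++ [e]) := rfl
    have hkeys : D.keys = PySem.List.dedup (xs.map pvRoundKey) := by
      show D.items.map Prod.fst = _
      rw [ih, List.map_map]
      simp [Function.comp_def, pvGroup]
    have hnodup : D.keys.Nodup := by rw [hkeys]; exact PySem.List.nodup_dedup _
    have hmapkeys : (xs ++ [e]).map pvRoundKey = xs.map pvRoundKey ++ [k'] := by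
      rw [List.map_append]; rfl
    rw [List.foldl_cons, List.foldl_nil, hmod]
    by_cases hc : k' ∈ xs.map pvRoundKey
    · have hcont : D.contains k' = true := by
        rw [PySem.Dict.contains_iff_mem_keys D k', hkeys, PySem.List.mem_dedup]; exact hc
      have hmemit : (k', xs.filter (fun x => pvRoundKey x == k')) ∈ D.items := by
        rw [ih]
        exact List.mem_map.mpr ⟨k', (PySem.List.mem_dedup _ _).mpr hc, rfl⟩
      have hgetD : D.getD k' [] = xs.filter (fun x => pvRoundKey x == k') :=
        PySem.Dict.getD_of_mem_items D hmemit hnodup []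
      rw [PySem.Dict.items_insert_of_contains D _ hcont, ih, hgetD, hmapkeys,
          pv_dedup_append_of_mem _ _ hc, List.map_map]
      apply List.map_congr_left
      intro a ha
      have hmem : a ∈ xs.map pvRoundKey := (PySem.List.mem_dedup _ _).mp ha
      simp only [Function.comp, pvGroup, List.filter_append, List.filter_cons, List.filter_nil]
      by_cases hak : a = k'
      · subst hak
        simp
        exact hk'.symm
      · have : (a == k') = false := by simpa using hak
        simp [hak]
        exact fun hh => hak ((hk'.trans hh).symm)
    · have hcont : D.contains k' = false := by
        have : k' ∉ D.keys := by rw [hkeys, PySem.List.mem_dedup]; exact hc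
        rcases Bool.eq_false_or_eq_true (D.contains k') with h1 | h1
        · exact absurd ((PySem.Dict.contains_iff_mem_keys D k').mp h1) this
        · exact h1
      have hgetD : D.getD k' [] = [] := by
        have hnone : D.get? k' = none := by
          rw [PySem.Dict.get?_eq_none_iff_not_mem_keys D k', hkeys, PySem.List.mem_dedup]; exact hc
        show (D.get? k').getD [] = []
        rw [hnone]; rfl
      have hfilt : xs.filter (fun x => pvRoundKey x == k') = [] := by
        apply List.filter_eq_nil_iff.mpr
        intro x hx
        simp only [beq_iff_eq]
        intro hxk
        exact hc (List.mem_map.mpr ⟨x, hx, hxk⟩)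
      rw [PySem.Dict.items_insert_of_not_contains D _ hcont, ih, hgetD, hmapkeys,
          pv_dedup_append_of_not_mem _ _ hc, List.map_append]
      congr 1
      · apply List.map_congr_left
        intro a ha
        have hmem : a ∈ xs.map pvRoundKey := (PySem.List.mem_dedup _ _).mp ha
        have hak : a ≠ k' := fun hh => hc (hh ▸ hmem)
        simp only [pvGroup, List.filter_append, List.filter_cons, List.filter_nil]
        have : (pvRoundKey e == a) = false := by
          simpa using fun hh => hak (by rw [← hh])
        simp [this]
      · simp [pvGroup, List.filter_append, hfilt, ← hk']

-- ===== VERDICT (by name: the statement is the Claim_ definition above) =====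
theorem collect_entries_by_round_spec : Claim_equal_collect_entries_by_round := by
  intro xs _ _
  unfold Spec_collect_entries_by_round
  show collect_entries_by_round xs = collect_entries_by_round_alt xs
  simp only [collect_entries_by_round, collect_entries_by_round_alt]
  rw [pv_fold_items]
  rw [pv_runs_eq _ (PySem.List.sorted_pairwise xs pvRoundKey)]
  have hgr : (PySem.List.dedup ((PySem.List.sorted xs pvRoundKey false).map pvRoundKey)).map
        (pvGroup (PySem.List.sorted xs pvRoundKey false))
      = (PySem.List.dedup ((PySem.List.sorted xs pvRoundKey false).map pvRoundKey)).map (pvGroup xs) := by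
    apply List.map_congr_left
    intro k _
    unfold pvGroup
    rw [pv_filter_sorted]
  rw [hgr]
  apply PySem.List.sorted_eq_of_perm_of_pairwise_lt
  · apply List.Perm.map
    rw [List.perm_ext_iff_of_nodup (PySem.List.nodup_dedup _) (PySem.List.nodup_dedup _)]
    intro a
    rw [PySem.List.mem_dedup, PySem.List.mem_dedup]
    exact (List.Perm.map pvRoundKey (PySem.List.sorted_perm xs pvRoundKey false)).mem_iff
  · have h1 : ((PySem.List.sorted xs pvRoundKey false).map pvRoundKey).Pairwise (· ≤ ·) :=
      PySem.List.sorted_map_key_pairwise xs pvRoundKey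
    have h2 := h1.sublist (pv_dedup_sublist ((PySem.List.sorted xs pvRoundKey false).map pvRoundKey))
    have h3 : (PySem.List.dedup ((PySem.List.sorted xs pvRoundKey false).map pvRoundKey)).Pairwise (· ≠ ·) :=
      PySem.List.nodup_dedup _
    have h4 := h2.and h3
    rw [List.pairwise_map]
    exact h4.imp (fun h => by
      simpa [pvGroup] using lt_of_le_of_ne h.1 h.2)
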